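-- pv_equiv track=rewrite | github.com/ahhuu/Arna | Android_GNSS_Analysis/src/processing/cycle_slip_detector.py | format_detection_summary
-- ===== SOURCE A (Python) =====
-- from typing import Dict, Any, List, Tuple, Optional
--
-- def format_detection_summary(detection_results: Dict[str, Any]) -> str:
--     """
--     格式化周跳探测摘要
--
--     Args:
--         detection_results: detect_cycle_slips的返回结果
--
--     Returns:
--         格式化的摘要字符串
--     """
--     total_cycle_slips = 0
--     total_outliers = 0
--     affected_satellites = []
--
--     for sat_id, result in detection_results.items():
--         mw = result.get('mw', {})
--         gf = result.get('gf', {})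
--         lli = result.get('lli', {})
--
--         mw_slips = len(mw.get('cycle_slips', []))
--         mw_outliers = len(mw.get('outliers', []))
--         gf_slips = len(gf.get('cycle_slips', []))
--         lli_slips = len(lli.get('cycle_slips', []))
--         lli_half = len(lli.get('half_cycle_events', []))
--
--         if mw_slips > 0 or gf_slips > 0 or lli_slips > 0 or lli_half > 0:
--             affected_satellites.append(sat_id)
--             total_cycle_slips += mw_slips + gf_slips + lli_slips
--             total_outliers += mw_outliers
--
--     summary = f"周跳探测摘要:\n"
--     summary += f"  处理卫星数: {len(detection_results)}\n"
--     summary += f"  发现周跳数: {total_cycle_slips}\n"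
--     summary += f"  发现粗差数: {total_outliers}\n"
--     summary += f"  受影响卫星: {', '.join(affected_satellites) if affected_satellites else '无'}\n"
--
--     return summary
-- ===== SOURCE B (Python) =====
-- def format_detection_summary(detection_results):
--     """Same summary, computed by independent comprehensions instead of one stateful loop."""
--
--     def _affected(result):
--         return bool(result.get('mw', {}).get('cycle_slips', [])
--                     or result.get('gf', {}).get('cycle_slips', [])
--                     or result.get('lli', {}).get('cycle_slips', [])
--                     or result.get('lli', {}).get('half_cycle_events', []))
--
--     affected_satellites = [sat_id for sat_id, result in detection_results.items()
--                            if _affected(result)]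
--     # unaffected satellites have zero slips in every technique, so summing over all matches A
--     total_cycle_slips = sum(len(result.get(tech, {}).get('cycle_slips', []))
--                             for result in detection_results.values()
--                             for tech in ('mw', 'gf', 'lli'))
--     total_outliers = sum(len(result.get('mw', {}).get('outliers', []))
--                          for result in detection_results.values()
--                          if _affected(result))
--
--     return (f"周跳探测摘要:\n"
--             f"  处理卫星数: {len(detection_results)}\n"
--             f"  发现周跳数: {total_cycle_slips}\n"
--             f"  发现粗差数: {total_outliers}\n"
--             f"  受影响卫星: {', '.join(affected_satellites) if affected_satellites else '无'}\n")
-- ===== Notes on version B (the rewrite author's own statement) =====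
-- stated objective: alternative
-- what changed: Replaced A's single stateful loop (three mutable accumulators updated under one guard) by three independent comprehensions: an affected-satellite filter, an unconditional sum of slip counts over all satellites (unaffected ones contribute 0), and a sum of outlier counts restricted to affected satellites.
import Mathlib
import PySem

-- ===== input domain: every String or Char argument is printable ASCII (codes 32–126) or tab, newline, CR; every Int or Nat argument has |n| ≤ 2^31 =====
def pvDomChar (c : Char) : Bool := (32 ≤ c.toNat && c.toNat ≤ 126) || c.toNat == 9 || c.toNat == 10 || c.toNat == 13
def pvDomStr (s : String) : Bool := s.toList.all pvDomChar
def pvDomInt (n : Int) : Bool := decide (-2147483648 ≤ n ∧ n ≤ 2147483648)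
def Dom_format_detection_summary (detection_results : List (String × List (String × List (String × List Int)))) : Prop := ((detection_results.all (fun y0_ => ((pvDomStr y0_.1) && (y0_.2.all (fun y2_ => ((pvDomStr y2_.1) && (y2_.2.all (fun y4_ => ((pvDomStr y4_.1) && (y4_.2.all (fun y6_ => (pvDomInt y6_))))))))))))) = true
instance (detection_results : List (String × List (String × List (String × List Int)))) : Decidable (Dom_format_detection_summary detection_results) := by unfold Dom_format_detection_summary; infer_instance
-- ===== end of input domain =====

-- B replaces A's one stateful loop by three independent comprehensions (filter + two sums); same output, same cost.

-- shared primitive: Python dict.get(k, dflt) on an association list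
def pyGetD {α : Type} (l : List (String × α)) (k : String) (dflt : α) : α :=
  (PySem.Dict.mk l).getD k dflt

-- ===== PORT A =====
def format_detection_summary (detection_results : List (String × List (String × List (String × List Int)))) : String :=
  let st := detection_results.foldl (fun (st : Nat × Nat × List String) p =>
    let mw := pyGetD p.2 "mw" []
    let gf := pyGetD p.2 "gf" []
    let lli := pyGetD p.2 "lli" []
    let mw_slips := (pyGetD mw "cycle_slips" []).length
    let mw_outliers := (pyGetD mw "outliers" []).length
    let gf_slips := (pyGetD gf "cycle_slips" []).length
    let lli_slips := (pyGetD lli "cycle_slips" []).length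
    let lli_half := (pyGetD lli "half_cycle_events" []).length
    if mw_slips > 0 ∨ gf_slips > 0 ∨ lli_slips > 0 ∨ lli_half > 0 then
      (st.1 + (mw_slips + gf_slips + lli_slips), st.2.1 + mw_outliers, st.2.2 ++ [p.1])
    else st) (0, 0, [])
  "周跳探测摘要:\n" ++
  "  处理卫星数: " ++ PySem.Int.toStr detection_results.length ++ "\n" ++
  "  发现周跳数: " ++ PySem.Int.toStr st.1 ++ "\n" ++
  "  发现粗差数: " ++ PySem.Int.toStr st.2.1 ++ "\n" ++
  "  受影响卫星: " ++ (if st.2.2.isEmpty then "无" else PySem.Str.join ", " st.2.2) ++ "\n"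

-- ===== PORT B =====
def pvAffected (result : List (String × List (String × List Int))) : Bool :=
  !(pyGetD (pyGetD result "mw" []) "cycle_slips" []).isEmpty ||
  !(pyGetD (pyGetD result "gf" []) "cycle_slips" []).isEmpty ||
  !(pyGetD (pyGetD result "lli" []) "cycle_slips" []).isEmpty ||
  !(pyGetD (pyGetD result "lli" []) "half_cycle_events" []).isEmpty

def format_detection_summary_alt (detection_results : List (String × List (String × List (String × List Int)))) : String :=
  let affected_satellites := (detection_results.filter (fun p => pvAffected p.2)).map (·.1)
  let total_cycle_slips :=
    ((detection_results.map (·.2)).flatMap (fun result =>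
      ["mw", "gf", "lli"].map (fun tech =>
        (pyGetD (pyGetD result tech []) "cycle_slips" []).length))).sum
  let total_outliers :=
    (((detection_results.map (·.2)).filter pvAffected).map (fun result =>
      (pyGetD (pyGetD result "mw" []) "outliers" []).length)).sum
  "周跳探测摘要:\n" ++
  "  处理卫星数: " ++ PySem.Int.toStr detection_results.length ++ "\n" ++
  "  发现周跳数: " ++ PySem.Int.toStr total_cycle_slips ++ "\n" ++
  "  发现粗差数: " ++ PySem.Int.toStr total_outliers ++ "\n" ++
  "  受影响卫星: " ++ (if affected_satellites.isEmpty then "无" else PySem.Str.join ", " affected_satellites) ++ "\n"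

-- ===== PRECONDITION & SPEC =====
def Spec_format_detection_summary (detection_results : List (String × List (String × List (String × List Int)))) (out : String) : Prop := out = format_detection_summary_alt detection_results
instance (detection_results : List (String × List (String × List (String × List Int)))) (out : String) : Decidable (Spec_format_detection_summary detection_results out) := by unfold Spec_format_detection_summary; infer_instance

-- ===== CLAIM (what is proved, stated in full; the proofs are below) =====
def Claim_equal_format_detection_summary : Prop := ∀ (detection_results : List (String × List (String × List (String × List Int)))), Dom_format_detection_summary detection_results → Spec_format_detection_summary detection_results (format_detection_summary detection_results)

-- ===== LEMMAS AND PROOFS =====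

-- slip count of one satellite (the value A adds when the guard fires, B sums unconditionally)
def pvSlips (r : List (String × List (String × List Int))) : Nat :=
  (pyGetD (pyGetD r "mw" []) "cycle_slips" []).length +
  (pyGetD (pyGetD r "gf" []) "cycle_slips" []).length +
  (pyGetD (pyGetD r "lli" []) "cycle_slips" []).length

def pvOut (r : List (String × List (String × List Int))) : Nat :=
  (pyGetD (pyGetD r "mw" []) "outliers" []).length

-- A's step function, named so the loop invariant can talk about it
def pvStepA (st : Nat × Nat × List String) (p : String × List (String × List (String × List Int))) : Nat × Nat × List String :=
  let mw := pyGetD p.2 "mw" []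
  let gf := pyGetD p.2 "gf" []
  let lli := pyGetD p.2 "lli" []
  let mw_slips := (pyGetD mw "cycle_slips" []).length
  let mw_outliers := (pyGetD mw "outliers" []).length
  let gf_slips := (pyGetD gf "cycle_slips" []).length
  let lli_slips := (pyGetD lli "cycle_slips" []).length
  let lli_half := (pyGetD lli "half_cycle_events" []).length
  if mw_slips > 0 ∨ gf_slips > 0 ∨ lli_slips > 0 ∨ lli_half > 0 then
    (st.1 + (mw_slips + gf_slips + lli_slips), st.2.1 + mw_outliers, st.2.2 ++ [p.1])
  else st

theorem pvStepA_eq (st : Nat × Nat × List String) (p : String × List (String × List (String × List Int))) :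
    pvStepA st p = if pvAffected p.2 then (st.1 + pvSlips p.2, st.2.1 + pvOut p.2, st.2.2 ++ [p.1]) else st := by
  unfold pvStepA pvAffected pvSlips pvOut
  rcases st with ⟨a, b, c⟩
  simp only [Bool.or_eq_true, Bool.not_eq_eq_eq_not, Bool.not_true, List.isEmpty_eq_false_iff,
    List.ne_nil_iff_length_pos]
  split_ifs with h1 h2 <;> first | rfl | (exfalso; omega)

-- B's three quantities over a list
def pvTcs (l : List (String × List (String × List (String × List Int)))) : Nat :=
  ((l.map (·.2)).flatMap (fun r => ["mw", "gf", "lli"].map (fun t => (pyGetD (pyGetD r t []) "cycle_slips" []).length))).sum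

def pvTout (l : List (String × List (String × List (String × List Int)))) : Nat :=
  (((l.map (·.2)).filter pvAffected).map pvOut).sum

def pvAffList (l : List (String × List (String × List (String × List Int)))) : List String :=
  (l.filter (fun p => pvAffected p.2)).map (·.1)

theorem pvSlips_of_not_affected (r : List (String × List (String × List Int)))
    (h : pvAffected r = false) : pvSlips r = 0 := by
  unfold pvAffected at h
  unfold pvSlips
  simp only [Bool.or_eq_false_iff, Bool.not_eq_eq_eq_not, Bool.not_false,
    List.isEmpty_iff] at h
  simp [h.1.1.1, h.1.1.2, h.1.2]

theorem pvTcs_cons (p : String × List (String × List (String × List Int)))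
    (l : List (String × List (String × List (String × List Int)))) :
    pvTcs (p :: l) = pvSlips p.2 + pvTcs l := by
  simp [pvTcs, pvSlips]
  omega

theorem pvFoldA (l : List (String × List (String × List (String × List Int))))
    (t o : Nat) (acc : List String) :
    l.foldl pvStepA (t, o, acc) = (t + pvTcs l, o + pvTout l, acc ++ pvAffList l) := by
  induction l generalizing t o acc with
  | nil => simp [pvTcs, pvTout, pvAffList]
  | cons p l ih =>
    simp only [List.foldl_cons, pvStepA_eq, pvTcs_cons]
    by_cases h : pvAffected p.2
    · rw [if_pos h, ih]
      simp only [pvTout, pvAffList, List.map_cons, List.filter_cons, h, if_pos, List.sum_cons,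
        Prod.mk.injEq, List.map_cons]
      refine ⟨by omega, by omega, by simp⟩
    · rw [if_neg h, ih]
      have hs := pvSlips_of_not_affected p.2 (by simpa using h)
      simp only [Bool.not_eq_true] at h
      simp only [pvTout, pvAffList, List.map_cons, List.filter_cons, h, Prod.mk.injEq]
      refine ⟨by omega, rfl, rfl⟩

-- ===== VERDICT (by name: the statement is the Claim_ definition above) =====
theorem format_detection_summary_spec : Claim_equal_format_detection_summary := by
  intro l _
  show format_detection_summary l = format_detection_summary_alt l
  have h : l.foldl pvStepA (0, 0, []) = (pvTcs l, pvTout l, pvAffList l) := by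
    simpa using pvFoldA l 0 0 []
  show ("周跳探测摘要:\n" ++
      "  处理卫星数: " ++ PySem.Int.toStr (l.length : Int) ++ "\n" ++
      "  发现周跳数: " ++ PySem.Int.toStr ((l.foldl pvStepA (0, 0, [])).1 : Int) ++ "\n" ++
      "  发现粗差数: " ++ PySem.Int.toStr ((l.foldl pvStepA (0, 0, [])).2.1 : Int) ++ "\n" ++
      "  受影响卫星: " ++ (if (l.foldl pvStepA (0, 0, [])).2.2.isEmpty then "无"
        else PySem.Str.join ", " (l.foldl pvStepA (0, 0, [])).2.2) ++ "\n") =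
    format_detection_summary_alt l
  rw [h]
  rfl
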